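-- pv_equiv track=rewrite | github.com/fungi-svaga/python-homework-storage-2025 | Сутягина Дарья Денисовна/LAB02/task02.py | analyze_string
-- ===== SOURCE A (Python) =====
-- def analyze_string(text: str) -> dict:
--     text = text.strip()
--
--     result = {
--         "words": 0,
--         "letters": 0,
--         "digits": 0,
--         "spaces": 0,
--         "punctuation": 0
--     }
--
--     if text:
--         result["words"] = len(text.split())
--
--     punctuation_marks = ".,!?;:-()\"'"
--
--     for char in text:
--         if char.isalpha():
--             result["letters"] += 1
--         elif char.isdigit():
--             result["digits"] += 1
--         elif char == " ":
--             result["spaces"] += 1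
--         elif char in punctuation_marks:
--             result["punctuation"] += 1
--
--     return result
-- ===== SOURCE B (Python) =====
-- def analyze_string(text: str) -> dict:
--     text = text.strip()
--     punctuation_marks = ".,!?;:-()\"'"
--     return {
--         "words": len(text.split()),
--         "letters": sum(c.isalpha() for c in text),
--         "digits": sum(c.isdigit() for c in text),
--         "spaces": sum(c == " " for c in text),
--         "punctuation": sum(c in punctuation_marks for c in text),
--     }
-- ===== Notes on version B (the rewrite author's own statement) =====
-- stated objective: simpler
-- what changed: Replaces the mutable dict plus single fused if/elif counting loop (and the nonempty-guard for words) with a dict literal of five independent one-pass tallies (split length, and per-category generator sums); the nonempty-text guard disappears because splitting an empty string already yields an empty word list.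
import Mathlib
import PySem

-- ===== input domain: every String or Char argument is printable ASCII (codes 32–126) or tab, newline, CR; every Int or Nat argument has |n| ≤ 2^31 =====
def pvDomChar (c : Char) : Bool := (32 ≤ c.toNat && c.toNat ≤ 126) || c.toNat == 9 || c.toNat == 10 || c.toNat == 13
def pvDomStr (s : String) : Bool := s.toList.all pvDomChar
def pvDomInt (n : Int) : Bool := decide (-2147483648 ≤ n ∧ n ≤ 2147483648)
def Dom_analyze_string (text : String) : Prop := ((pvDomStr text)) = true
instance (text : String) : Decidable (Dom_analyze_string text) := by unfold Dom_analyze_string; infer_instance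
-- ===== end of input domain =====

-- B replaces A's mutable dict + fused if/elif counting loop by a dict literal of five
-- independent one-pass tallies (objective: simpler); same return value everywhere.

-- ===== PORT A =====
def pvPunct : List Char := ['.', ',', '!', '?', ';', ':', '-', '(', ')', '"', '\'']

def pvStepA (d : PySem.Dict String Int) (c : Char) : PySem.Dict String Int :=
  if PySem.Chars.isalpha c then d.insert "letters" (d.getD "letters" 0 + 1)
  else if PySem.Chars.isdigit c then d.insert "digits" (d.getD "digits" 0 + 1)
  else if c == ' ' then d.insert "spaces" (d.getD "spaces" 0 + 1)
  else if pvPunct.contains c then d.insert "punctuation" (d.getD "punctuation" 0 + 1)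
  else d

def analyze_string (text : String) : List (String × Int) :=
  let t := PySem.Chars.strip text.toList
  let result : PySem.Dict String Int :=
    PySem.Dict.ofList [("words", 0), ("letters", 0), ("digits", 0), ("spaces", 0), ("punctuation", 0)]
  let result := if t = [] then result else result.insert "words" ((PySem.Chars.split₀ t).length : Int)
  (t.foldl pvStepA result).items

-- ===== PORT B =====
def analyze_string_alt (text : String) : List (String × Int) :=
  let t := PySem.Chars.strip text.toList
  [("words", ((PySem.Chars.split₀ t).length : Int)),
   ("letters", (t.countP (fun c => PySem.Chars.isalpha c) : Int)),
   ("digits", (t.countP (fun c => PySem.Chars.isdigit c) : Int)),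
   ("spaces", (t.countP (fun c => c == ' ') : Int)),
   ("punctuation", (t.countP (fun c => pvPunct.contains c) : Int))]

-- ===== PRECONDITION & SPEC =====
def Spec_analyze_string (text : String) (out : List (String × Int)) : Prop := out = analyze_string_alt text
instance (text : String) (out : List (String × Int)) : Decidable (Spec_analyze_string text out) := by unfold Spec_analyze_string; infer_instance

-- ===== CLAIM (what is proved, stated in full; the proofs are below) =====
def Claim_equal_analyze_string : Prop := ∀ (text : String), Dom_analyze_string text → Spec_analyze_string text (analyze_string text)

-- ===== LEMMAS AND PROOFS =====

-- the four elif tests are mutually exclusive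
theorem pv_alpha_not_digit (c : Char) (h : PySem.Chars.isalpha c = true) : PySem.Chars.isdigit c = false := by
  simp [PySem.Chars.isalpha, PySem.Chars.isupper, PySem.Chars.islower, PySem.Chars.isdigit,
    Char.le_def, UInt32.le_iff_toNat_le] at h ⊢
  omega

theorem pv_alpha_not_space (c : Char) (h : PySem.Chars.isalpha c = true) : (c == ' ') = false := by
  simp [PySem.Chars.isalpha, PySem.Chars.isupper, PySem.Chars.islower,
    Char.le_def, UInt32.le_iff_toNat_le] at h ⊢
  rintro rfl; revert h; decide

theorem pv_alpha_not_punct (c : Char) (h : PySem.Chars.isalpha c = true) : pvPunct.contains c = false := by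
  by_cases hc : c ∈ pvPunct
  · fin_cases hc <;> revert h <;> decide
  · simpa using hc

theorem pv_digit_not_space (c : Char) (h : PySem.Chars.isdigit c = true) : (c == ' ') = false := by
  simp [PySem.Chars.isdigit, Char.le_def, UInt32.le_iff_toNat_le] at h ⊢
  rintro rfl; revert h; decide

theorem pv_digit_not_punct (c : Char) (h : PySem.Chars.isdigit c = true) : pvPunct.contains c = false := by
  by_cases hc : c ∈ pvPunct
  · fin_cases hc <;> revert h <;> decide
  · simpa using hc

theorem pv_space_not_punct (c : Char) (h : (c == ' ') = true) : pvPunct.contains c = false := by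
  have : c = ' ' := by simpa using h
  subst this; decide

-- A's counting loop over any char list, from arbitrary starting tallies
theorem pv_loopA (cs : List Char) (w a b s p : Int) :
    (cs.foldl pvStepA (PySem.Dict.mk [("words", w), ("letters", a), ("digits", b), ("spaces", s), ("punctuation", p)])).items
    = [("words", w),
       ("letters", a + (cs.countP (fun c => PySem.Chars.isalpha c) : Int)),
       ("digits", b + (cs.countP (fun c => PySem.Chars.isdigit c) : Int)),
       ("spaces", s + (cs.countP (fun c => c == ' ') : Int)),
       ("punctuation", p + (cs.countP (fun c => pvPunct.contains c) : Int))] := by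
  induction cs generalizing a b s p with
  | nil => simp
  | cons c cs ih =>
    simp only [List.foldl_cons]
    by_cases h1 : PySem.Chars.isalpha c = true
    · have e : pvStepA (PySem.Dict.mk [("words", w), ("letters", a), ("digits", b), ("spaces", s), ("punctuation", p)]) c
          = PySem.Dict.mk [("words", w), ("letters", a + 1), ("digits", b), ("spaces", s), ("punctuation", p)] := by
        simp [pvStepA, h1, PySem.Dict.insert, PySem.Dict.contains, PySem.Dict.getD, PySem.Dict.get?]
      rw [e, ih]
      have hp : c ∉ pvPunct := by simpa using pv_alpha_not_punct c h1
      simp [h1, pv_alpha_not_digit c h1, pv_alpha_not_space c h1, hp,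
        List.cons.injEq, Prod.mk.injEq]
      omega
    · by_cases h2 : PySem.Chars.isdigit c = true
      · have e : pvStepA (PySem.Dict.mk [("words", w), ("letters", a), ("digits", b), ("spaces", s), ("punctuation", p)]) c
            = PySem.Dict.mk [("words", w), ("letters", a), ("digits", b + 1), ("spaces", s), ("punctuation", p)] := by
          simp [pvStepA, h1, h2, PySem.Dict.insert, PySem.Dict.contains, PySem.Dict.getD, PySem.Dict.get?]
        rw [e, ih]
        have hp : c ∉ pvPunct := by simpa using pv_digit_not_punct c h2
        simp [h1, h2, pv_digit_not_space c h2, hp,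
          List.cons.injEq, Prod.mk.injEq]
        omega
      · by_cases h3 : (c == ' ') = true
        · have e : pvStepA (PySem.Dict.mk [("words", w), ("letters", a), ("digits", b), ("spaces", s), ("punctuation", p)]) c
              = PySem.Dict.mk [("words", w), ("letters", a), ("digits", b), ("spaces", s + 1), ("punctuation", p)] := by
            simp [pvStepA, h1, h2, h3, PySem.Dict.insert, PySem.Dict.contains, PySem.Dict.getD, PySem.Dict.get?]
          rw [e, ih]
          have hp : c ∉ pvPunct := by simpa using pv_space_not_punct c h3
          simp [h1, h2, h3, hp, List.cons.injEq, Prod.mk.injEq]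
          omega
        · by_cases h4 : pvPunct.contains c = true
          · have e : pvStepA (PySem.Dict.mk [("words", w), ("letters", a), ("digits", b), ("spaces", s), ("punctuation", p)]) c
                = PySem.Dict.mk [("words", w), ("letters", a), ("digits", b), ("spaces", s), ("punctuation", p + 1)] := by
              have h4' : c ∈ pvPunct := by simpa using h4
              simp [pvStepA, h1, h2, h3, h4', PySem.Dict.insert, PySem.Dict.contains, PySem.Dict.getD, PySem.Dict.get?]
            rw [e, ih]
            have h4' : c ∈ pvPunct := by simpa using h4
            simp [h1, h2, h3, h4', List.cons.injEq, Prod.mk.injEq]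
            omega
          · have e : pvStepA (PySem.Dict.mk [("words", w), ("letters", a), ("digits", b), ("spaces", s), ("punctuation", p)]) c
                = PySem.Dict.mk [("words", w), ("letters", a), ("digits", b), ("spaces", s), ("punctuation", p)] := by
              have h4' : c ∉ pvPunct := by simpa using h4
              simp [pvStepA, h1, h2, h3, h4']
            rw [e, ih]
            have h4' : c ∉ pvPunct := by simpa using h4
            simp [h1, h2, h3, h4']

theorem pv_start_dict (n : Int) :
    (PySem.Dict.ofList [(("words" : String), (0 : Int)), ("letters", 0), ("digits", 0), ("spaces", 0), ("punctuation", 0)]).insert "words" n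
    = PySem.Dict.mk [("words", n), ("letters", 0), ("digits", 0), ("spaces", 0), ("punctuation", 0)] := by
  have h : PySem.Dict.ofList [(("words" : String), (0 : Int)), ("letters", 0), ("digits", 0), ("spaces", 0), ("punctuation", 0)]
      = PySem.Dict.mk [("words", 0), ("letters", 0), ("digits", 0), ("spaces", 0), ("punctuation", 0)] := by decide
  rw [h]
  simp [PySem.Dict.insert, PySem.Dict.contains]

theorem analyze_string_spec : Claim_equal_analyze_string := by
  intro text _
  unfold Spec_analyze_string analyze_string analyze_string_alt
  by_cases ht : PySem.Chars.strip text.toList = []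
  · simp only [ht]
    decide
  · show (List.foldl pvStepA (if PySem.Chars.strip text.toList = [] then _ else _) _).items = _
    rw [if_neg ht, pv_start_dict, pv_loopA]
    simp
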